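-- pv_equiv track=rewrite | github.com/padrinosardo/TheNovelist | utils/exporters/markdown_exporter.py | _create_anchor
-- ===== SOURCE A (Python) =====
-- def _create_anchor(text: str) -> str:
--     """
--     Crea un anchor slug per i link TOC
--
--     Args:
--         text: Testo da convertire in anchor
--
--     Returns:
--         str: Anchor slug
--     """
--     # Converti in lowercase
--     slug = text.lower()
--
--     # Sostituisci spazi con trattini
--     slug = slug.replace(' ', '-')
--
--     # Rimuovi caratteri speciali (mantieni solo lettere, numeri e trattini)
--     slug = ''.join(c for c in slug if c.isalnum() or c == '-')
--
--     # Rimuovi trattini multipli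
--     while '--' in slug:
--         slug = slug.replace('--', '-')
--
--     # Rimuovi trattini iniziali/finali
--     slug = slug.strip('-')
--
--     return slug
-- ===== SOURCE B (Python) =====
-- def _create_anchor(text: str) -> str:
--     out = []
--     pending = False
--     for c in text:
--         if c.isalnum():
--             if pending and out:
--                 out.append('-')
--             out.append(c.lower())
--             pending = False
--         elif c == ' ' or c == '-':
--             pending = True
--     return ''.join(out)
-- ===== Notes on version B (the rewrite author's own statement) =====
-- stated objective: simpler
-- what changed: Replaces A's five-stage pipeline (lowercase, space-to-dash replace, filter, repeated '--'-collapse loop, strip) by a single left-to-right scan with a pending-separator flag that lazily emits at most one dash between emitted alphanumeric characters.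
import Mathlib
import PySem

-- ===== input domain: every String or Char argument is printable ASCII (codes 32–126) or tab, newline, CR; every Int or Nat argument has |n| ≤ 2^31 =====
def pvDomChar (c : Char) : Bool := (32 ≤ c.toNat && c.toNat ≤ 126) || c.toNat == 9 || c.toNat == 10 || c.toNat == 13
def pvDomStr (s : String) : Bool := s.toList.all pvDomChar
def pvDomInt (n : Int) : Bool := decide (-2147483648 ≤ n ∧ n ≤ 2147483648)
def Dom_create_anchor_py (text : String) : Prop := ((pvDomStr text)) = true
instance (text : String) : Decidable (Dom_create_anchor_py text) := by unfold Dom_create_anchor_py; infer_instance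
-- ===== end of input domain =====

-- B replaces A's five-stage pipeline (lower, replace, filter, repeated '--' collapse, strip)
-- by one left-to-right scan with a pending-separator flag; objective: simpler (single pass).

-- ===== PORT A =====

-- proof-level helper cited by loopA's termination proof: one pass of Python's
-- str.replace('--', '-') (left-to-right, non-overlapping)
def collapseOnce : List Char → List Char
  | [] => []
  | [c] => [c]
  | a :: b :: t =>
    if a = '-' ∧ b = '-' then '-' :: collapseOnce t else a :: collapseOnce (b :: t)

theorem length_collapseOnce_le (l : List Char) : (collapseOnce l).length ≤ l.length := by
  fun_induction collapseOnce l with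
  | case1 => simp [collapseOnce]
  | case2 => simp [collapseOnce]
  | case3 a b t h ih => simp [collapseOnce, h]; omega
  | case4 a b t h ih => simp [collapseOnce, h] at *; omega

theorem length_collapseOnce_lt (l : List Char) (h : ['-','-'] <:+: l) :
    (collapseOnce l).length < l.length := by
  fun_induction collapseOnce l with
  | case1 => simp at h
  | case2 c =>
    exfalso
    have := h.length_le
    simp at this
  | case3 a b t hg ih =>
    have := length_collapseOnce_le t
    simp [collapseOnce, hg]
    omega
  | case4 a b t hg ih =>
    rcases List.infix_cons_iff.mp h with hp | hi
    · exfalso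
      rcases hp with ⟨s, hs⟩
      simp at hs
      exact hg ⟨hs.1.symm, hs.2.1.symm⟩
    · have := ih hi
      simp [collapseOnce, hg] at *
      omega

theorem go_dd (fuel : Nat) : ∀ (l acc : List Char), l.length ≤ fuel →
    PySem.Chars.replace.go ['-','-'] ['-'] fuel l acc = acc.reverse ++ collapseOnce l := by
  induction fuel with
  | zero =>
    intro l acc h
    have : l = [] := List.eq_nil_of_length_eq_zero (Nat.le_zero.mp h)
    subst this
    rw [PySem.Chars.replace.go.eq_def]
    simp [collapseOnce]
  | succ fuel ih =>
    intro l acc h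
    match l with
    | [] => rw [PySem.Chars.replace.go.eq_def]; simp [collapseOnce]
    | c :: t =>
      rw [PySem.Chars.replace.go.eq_def]
      by_cases hp : List.isPrefixOf ['-','-'] (c :: t) = true
      · rcases List.isPrefixOf_iff_prefix.mp hp with ⟨s, hs⟩
        rw [show (['-','-'] : List Char) ++ s = '-' :: '-' :: s from rfl] at hs
        obtain ⟨rfl, rfl⟩ : c = '-' ∧ t = '-' :: s := by
          refine ⟨(List.cons.injEq ..).mp hs |>.1.symm, ?_⟩
          exact ((List.cons.injEq ..).mp hs).2.symm
        simp only [hp, if_true]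
        rw [show List.drop (['-','-'] : List Char).length ('-' :: '-' :: s) = s from rfl]
        rw [ih s (['-'].reverse ++ acc) (by simp at h; omega)]
        simp [collapseOnce]
      · simp only [hp, if_false]
        rw [ih t (c :: acc) (by simp at h; omega)]
        have hcol : collapseOnce (c :: t) = c :: collapseOnce t := by
          match t with
          | [] => rfl
          | b :: t' =>
            have : ¬ (c = '-' ∧ b = '-') := by
              intro ⟨h1, h2⟩
              subst h1; subst h2
              simp [List.isPrefixOf] at hp
            simp [collapseOnce, this]
        rw [hcol]
        simp

theorem replace_dd_eq (l : List Char) :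
    PySem.Chars.replace l ['-','-'] ['-'] = collapseOnce l := by
  unfold PySem.Chars.replace
  simp only [List.isEmpty_cons, if_false, Bool.false_eq_true]
  exact go_dd l.length l [] le_rfl

theorem replace_dd_length_lt (s : String) (h : PySem.Str.isIn "--" s = true) :
    (PySem.Str.replace s "--" "-").toList.length < s.toList.length := by
  have hin : ['-','-'] <:+: s.toList := by
    exact (PySem.Chars.isIn_iff_infix _ _).mp h
  have : (PySem.Str.replace s "--" "-").toList = PySem.Chars.replace s.toList ['-','-'] ['-'] := by
    simp [PySem.Str.replace]
  rw [this, replace_dd_eq]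
  exact length_collapseOnce_lt _ hin

-- the 'while "--" in slug: slug = slug.replace("--", "-")' loop of A
def loopA (s : String) : String :=
  if h : PySem.Str.isIn "--" s = true then loopA (PySem.Str.replace s "--" "-") else s
termination_by s.toList.length
decreasing_by exact replace_dd_length_lt s h

def create_anchor_py (text : String) : String :=
  -- slug = text.lower()
  let slug := PySem.Str.lower text
  -- slug = slug.replace(' ', '-')
  let slug := PySem.Str.replace slug " " "-"
  -- slug = ''.join(c for c in slug if c.isalnum() or c == '-')  (join of kept chars = filter)
  let slug := String.ofList (slug.toList.filter (fun c => PySem.Chars.isalnum c || c == '-'))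
  -- while '--' in slug: slug = slug.replace('--', '-')
  let slug := loopA slug
  -- slug.strip('-')
  PySem.Str.stripChars slug "-"

-- ===== PORT B =====

-- one step of B's loop body; state = (out, pending)
def stepB (st : List Char × Bool) (c : Char) : List Char × Bool :=
  if PySem.Chars.isalnum c then
    let out := if st.2 && !st.1.isEmpty then st.1 ++ ['-'] else st.1
    (out ++ [PySem.Chars.lowerChar c], false)
  else if c == ' ' || c == '-' then
    (st.1, true)
  else
    st

def create_anchor_py_alt (text : String) : String :=
  String.ofList (text.toList.foldl stepB ([], false)).1

-- ===== PRECONDITION & SPEC =====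
def Spec_create_anchor_py (text : String) (out : String) : Prop := out = create_anchor_py_alt text
instance (text : String) (out : String) : Decidable (Spec_create_anchor_py text out) := by unfold Spec_create_anchor_py; infer_instance

-- ===== CLAIM (what is proved, stated in full; the proofs are below) =====
def Claim_equal_create_anchor_py : Prop := ∀ (text : String), Dom_create_anchor_py text → Spec_create_anchor_py text (create_anchor_py text)

-- ===== LEMMAS AND PROOFS =====

-- ---- character-level facts ----
theorem char_le_iff (a b : Char) : (a ≤ b) ↔ (a.toNat ≤ b.toNat) := by
  rw [Char.le_def]; exact UInt32.le_iff_toNat_le ..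

theorem toNat_ofNat_valid (n : Nat) (h : n < 55296) : (Char.ofNat n).toNat = n := by
  have : n.isValidChar := Or.inl h
  simp [Char.ofNat, this, Char.toNat, Char.ofNatAux]

theorem alnum_lower (c : Char) :
    PySem.Chars.isalnum (PySem.Chars.lowerChar c) = PySem.Chars.isalnum c := by
  unfold PySem.Chars.lowerChar PySem.Chars.isalnum PySem.Chars.isalpha PySem.Chars.islower
    PySem.Chars.isupper PySem.Chars.isdigit
  split
  · rename_i h
    simp only [Bool.and_eq_true, decide_eq_true_eq, char_le_iff,
      show ('A').toNat = 65 from rfl, show ('Z').toNat = 90 from rfl] at h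
    simp only [char_le_iff, toNat_ofNat_valid (c.toNat+32) (by omega),
      show ('A').toNat = 65 from rfl, show ('Z').toNat = 90 from rfl,
      show ('a').toNat = 97 from rfl, show ('z').toNat = 122 from rfl,
      show ('0').toNat = 48 from rfl, show ('9').toNat = 57 from rfl]
    rw [Bool.eq_iff_iff]
    simp only [Bool.or_eq_true, Bool.and_eq_true, decide_eq_true_eq]
    omega
  · rfl

theorem lower_of_not_alnum (c : Char) (h : PySem.Chars.isalnum c = false) :
    PySem.Chars.lowerChar c = c := by
  unfold PySem.Chars.lowerChar
  have : PySem.Chars.isupper c = false := by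
    unfold PySem.Chars.isalnum PySem.Chars.isalpha at h
    simp only [Bool.or_eq_false_iff] at h
    exact h.1.1
  rw [this]
  simp

theorem lower_ne_dash (c : Char) (h : PySem.Chars.isalnum c = true) :
    PySem.Chars.lowerChar c ≠ '-' := by
  intro hd
  have := alnum_lower c
  rw [hd, h] at this
  exact absurd this (by decide)

-- ---- the per-character classification shared by both sides ----
def gchar (c : Char) : Option Char :=
  if PySem.Chars.isalnum c then some (PySem.Chars.lowerChar c)
  else if c = ' ' ∨ c = '-' then some '-'
  else none

theorem filter_map_generic {α β : Type} (f : α → β) (p : β → Bool) (l : List α) :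
    (l.map f).filter p = l.filterMap (fun c => if p (f c) then some (f c) else none) := by
  induction l with
  | nil => rfl
  | cons a t ih =>
    simp only [List.map_cons, List.filter_cons, List.filterMap_cons]
    by_cases h : p (f a) <;> simp [h, ih]

theorem per_char (c : Char) :
    (if (PySem.Chars.isalnum (if PySem.Chars.lowerChar c = ' ' then '-' else PySem.Chars.lowerChar c)
        || ((if PySem.Chars.lowerChar c = ' ' then '-' else PySem.Chars.lowerChar c) == '-'))
      then some (if PySem.Chars.lowerChar c = ' ' then '-' else PySem.Chars.lowerChar c) else none)
      = gchar c := by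
  by_cases ha : PySem.Chars.isalnum c = true
  · have h1 : PySem.Chars.isalnum (PySem.Chars.lowerChar c) = true := by rw [alnum_lower]; exact ha
    have h2 : PySem.Chars.lowerChar c ≠ ' ' := by
      intro hsp
      rw [hsp] at h1
      exact absurd h1 (by decide)
    simp [gchar, ha, h2, h1]
  · have h0 : PySem.Chars.isalnum c = false := by simpa using ha
    by_cases hsp : c = ' '
    · subst hsp
      simp [gchar, h0, show PySem.Chars.lowerChar ' ' = ' ' from rfl]
    · by_cases hda : c = '-'
      · subst hda
        simp [gchar, h0, show PySem.Chars.lowerChar '-' = '-' from rfl]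
      · have hl : PySem.Chars.lowerChar c = c := lower_of_not_alnum c h0
        have hk : (PySem.Chars.isalnum c || c == '-') = false := by simp [h0, hda]
        simp [gchar, hl, hsp, h0, hda, hk]

theorem filter_map_eq_filterMap (cs : List Char) :
    ((PySem.Chars.lower cs).map (fun c => if c = ' ' then '-' else c)).filter
        (fun c => PySem.Chars.isalnum c || c == '-')
      = cs.filterMap gchar := by
  rw [show PySem.Chars.lower cs = cs.map PySem.Chars.lowerChar from rfl, List.map_map,
    filter_map_generic]
  exact List.filterMap_congr (fun c _ => per_char c)

-- ---- the dash machinery: squeezeR (fully collapsed form) ----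
def squeezeR : List Char → List Char
  | [] => []
  | c :: t =>
    let r := squeezeR t
    if c = '-' ∧ r.head? = some '-' then r else c :: r

theorem squeezeR_dash_dash (r : List Char) :
    squeezeR ('-' :: '-' :: r) = squeezeR ('-' :: r) := by
  show (let x := squeezeR ('-' :: r); if '-' = '-' ∧ x.head? = some '-' then x else '-' :: x)
    = squeezeR ('-' :: r)
  have : (squeezeR ('-' :: r)).head? = some '-' := by
    show (let x := squeezeR r; if '-' = '-' ∧ x.head? = some '-' then x else '-' :: x).head? = some '-'
    by_cases h : (squeezeR r).head? = some '-'
    · simp [h]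
    · simp [h]
  simp [this]

theorem squeezeR_cons_ne (c : Char) (h : c ≠ '-') (t : List Char) :
    squeezeR (c :: t) = c :: squeezeR t := by
  show (let x := squeezeR t; if c = '-' ∧ x.head? = some '-' then x else c :: x) = c :: squeezeR t
  simp [h]

theorem squeezeR_collapseOnce (l : List Char) : squeezeR (collapseOnce l) = squeezeR l := by
  fun_induction collapseOnce l with
  | case1 => rfl
  | case2 c => rfl
  | case3 a b t h ih =>
    obtain ⟨rfl, rfl⟩ := h
    show squeezeR ('-' :: collapseOnce t) = squeezeR ('-' :: '-' :: t)
    rw [squeezeR_dash_dash]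
    show (let x := squeezeR (collapseOnce t); if '-' = '-' ∧ x.head? = some '-' then x else '-' :: x)
      = squeezeR ('-' :: t)
    rw [show squeezeR (collapseOnce t) = squeezeR t from ih]
    rfl
  | case4 a b t h ih =>
    show squeezeR (a :: collapseOnce (b :: t)) = squeezeR (a :: b :: t)
    show (let x := squeezeR (collapseOnce (b :: t)); if a = '-' ∧ x.head? = some '-' then x else a :: x)
      = squeezeR (a :: b :: t)
    rw [show squeezeR (collapseOnce (b :: t)) = squeezeR (b :: t) from ih]
    rfl

theorem squeezeR_of_no_dd (l : List Char) (h : ¬ (['-','-'] <:+: l)) : squeezeR l = l := by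
  induction l with
  | nil => rfl
  | cons c t ih =>
    have ht : squeezeR t = t := ih (fun hi => h (List.infix_cons_iff.mpr (Or.inr hi)))
    show (let x := squeezeR t; if c = '-' ∧ x.head? = some '-' then x else c :: x) = c :: t
    rw [ht]
    have : ¬ (c = '-' ∧ t.head? = some '-') := by
      rintro ⟨rfl, hh⟩
      match t, hh with
      | b :: t', hh =>
        have hb : b = '-' := by simpa using hh
        subst hb
        exact h ⟨[], t', by simp⟩
    simp [this]

theorem loopA_eq_squeezeR (s : String) : loopA s = String.ofList (squeezeR s.toList) := by
  fun_induction loopA s with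
  | case1 s h ih =>
    rw [ih]
    have h1 : (PySem.Str.replace s "--" "-").toList = collapseOnce s.toList := by
      simp [PySem.Str.replace]
      exact replace_dd_eq _
    rw [h1, squeezeR_collapseOnce]
  | case2 s h =>
    have hno : ¬ (['-','-'] <:+: s.toList) := by
      intro hi
      exact h ((PySem.Chars.isIn_iff_infix _ _).mpr hi)
    rw [squeezeR_of_no_dd _ hno]
    exact (String.ofList_toList (s := s)).symm

-- ---- strip machinery ----
def pdash (c : Char) : Bool := (['-'] : List Char).contains c

theorem pdash_iff (c : Char) : pdash c = true ↔ c = '-' := by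
  simp [pdash]

def lstr (l : List Char) : List Char := l.dropWhile pdash
def rstr (l : List Char) : List Char := (l.reverse.dropWhile pdash).reverse

theorem stripChars_eq (s : String) :
    PySem.Str.stripChars s "-" = String.ofList (rstr (lstr s.toList)) := rfl

theorem rstr_cons (c : Char) (x : List Char) :
    rstr (c :: x) = if rstr x = [] then (if pdash c then [] else [c]) else c :: rstr x := by
  unfold rstr
  rw [show (c :: x).reverse = x.reverse ++ [c] from by simp, List.dropWhile_append]
  by_cases h : (x.reverse.dropWhile pdash).isEmpty = true
  · have h2 : (x.reverse.dropWhile pdash).reverse = [] := by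
      rw [List.isEmpty_iff] at h; simp [h]
    rw [if_pos h, if_pos h2]
    by_cases hc : pdash c
    · simp [List.dropWhile, hc]
    · simp [List.dropWhile, hc]
  · have h2 : ¬ ((x.reverse.dropWhile pdash).reverse = []) := by
      rw [List.isEmpty_iff] at h; simpa using h
    rw [if_neg h, if_neg h2]
    simp

theorem rstr_cons_ne (c : Char) (h : c ≠ '-') (x : List Char) : rstr (c :: x) = c :: rstr x := by
  rw [rstr_cons]
  have : pdash c = false := by
    rw [← Bool.not_eq_true]; rw [pdash_iff]; exact h
  by_cases hx : rstr x = []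
  · simp [hx, this]
  · simp [hx]

theorem rstr_dash (x : List Char) :
    rstr ('-' :: x) = if rstr x = [] then [] else '-' :: rstr x := by
  rw [rstr_cons]
  simp [show pdash '-' = true from by rw [pdash_iff]]

-- ---- the scan functions F/Fh that both sides reduce to ----
def Fh : Bool → List Char → List Char
  | _, [] => []
  | b, d :: t => if d = '-' then Fh true t else (if b then ['-'] else []) ++ d :: Fh false t

def Fmain : List Char → List Char
  | [] => []
  | d :: t => if d = '-' then Fmain t else d :: Fh false t

theorem Fh_eq_rstr (t : List Char) :
    Fh false t = rstr (squeezeR t) ∧ Fh true t = rstr (squeezeR ('-' :: t)) := by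
  induction t with
  | nil =>
    constructor
    · rfl
    · show Fh true [] = rstr (squeezeR ['-'])
      rw [show squeezeR ['-'] = ['-'] from rfl]
      rfl
  | cons d u ih =>
    by_cases hd : d = '-'
    · subst hd
      constructor
      · show Fh true u = rstr (squeezeR ('-' :: u))
        exact ih.2
      · show Fh true u = rstr (squeezeR ('-' :: '-' :: u))
        rw [squeezeR_dash_dash]
        exact ih.2
    · have hsq : squeezeR (d :: u) = d :: squeezeR u := squeezeR_cons_ne d hd u
      constructor
      · show (if d = '-' then Fh true u else (if false = true then ['-'] else []) ++ d :: Fh false u)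
          = rstr (squeezeR (d :: u))
        rw [if_neg hd, hsq, rstr_cons_ne d hd]
        simp [ih.1]
      · show (if d = '-' then Fh true u else (if true = true then ['-'] else []) ++ d :: Fh false u)
          = rstr (squeezeR ('-' :: d :: u))
        rw [if_neg hd]
        have : squeezeR ('-' :: d :: u) = '-' :: d :: squeezeR u := by
          show (let x := squeezeR (d :: u); if '-' = '-' ∧ x.head? = some '-' then x else '-' :: x)
            = '-' :: d :: squeezeR u
          rw [hsq]
          simp [hd]
        rw [this, rstr_dash, rstr_cons_ne d hd]
        simp [ih.1]

theorem lstr_squeezeR_dash (t : List Char) :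
    lstr (squeezeR ('-' :: t)) = lstr (squeezeR t) := by
  show lstr (let x := squeezeR t; if '-' = '-' ∧ x.head? = some '-' then x else '-' :: x)
    = lstr (squeezeR t)
  by_cases h : (squeezeR t).head? = some '-'
  · simp [h]
  · simp only [h]
    have : lstr ('-' :: squeezeR t) = lstr (squeezeR t) := by
      unfold lstr
      simp [List.dropWhile, show pdash '-' = true from by rw [pdash_iff]]
    simp [this]

theorem strip_squeezeR (ds : List Char) : rstr (lstr (squeezeR ds)) = Fmain ds := by
  induction ds with
  | nil => rfl
  | cons d t ih =>
    by_cases hd : d = '-'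
    · subst hd
      rw [lstr_squeezeR_dash]
      show rstr (lstr (squeezeR t)) = Fmain ('-' :: t)
      rw [ih]
      rfl
    · rw [squeezeR_cons_ne d hd]
      have hl : lstr (d :: squeezeR t) = d :: squeezeR t := by
        unfold lstr
        have : pdash d = false := by rw [← Bool.not_eq_true, pdash_iff]; exact hd
        simp [List.dropWhile, this]
      rw [hl, rstr_cons_ne d hd]
      show d :: rstr (squeezeR t) = Fmain (d :: t)
      rw [← (Fh_eq_rstr t).1]
      simp [Fmain, hd]

-- ---- B's fold computes Fmain ∘ filterMap gchar ----
theorem foldl_stepB_ne_nil (cs : List Char) : ∀ (out : List Char) (p : Bool), out ≠ [] →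
    (cs.foldl stepB (out, p)).1 = out ++ Fh p (cs.filterMap gchar) := by
  induction cs with
  | nil => intro out p h; simp [Fh]
  | cons c t ih =>
    intro out p h
    simp only [List.foldl_cons, List.filterMap_cons]
    by_cases ha : PySem.Chars.isalnum c = true
    · have hg : gchar c = some (PySem.Chars.lowerChar c) := by simp [gchar, ha]
      have hne : PySem.Chars.lowerChar c ≠ '-' := lower_ne_dash c ha
      rw [hg]
      have hstep : stepB (out, p) c =
          ((if p && !out.isEmpty then out ++ ['-'] else out) ++ [PySem.Chars.lowerChar c], false) := by
        simp [stepB, ha]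
      rw [hstep, ih _ _ (by simp)]
      have hFh : Fh p (PySem.Chars.lowerChar c :: t.filterMap gchar)
          = (if p then ['-'] else []) ++ PySem.Chars.lowerChar c :: Fh false (t.filterMap gchar) := by
        simp [Fh, hne]
      rw [hFh]
      have hoe : (!out.isEmpty) = true := by
        simp [List.isEmpty_iff, h]
      cases p <;> simp [hoe]
    · have h0 : PySem.Chars.isalnum c = false := by simpa using ha
      by_cases hs : c = ' ' ∨ c = '-'
      · have hg : gchar c = some '-' := by simp [gchar, h0, hs]
        have hstep : stepB (out, p) c = (out, true) := by
          rcases hs with rfl | rfl <;> simp [stepB, h0]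
        rw [hg, hstep, ih _ _ h]
        simp [Fh]
      · have hg : gchar c = none := by simp [gchar, h0, hs]
        have hstep : stepB (out, p) c = (out, p) := by
          have h1 : (c == ' ') = false := by simp; tauto
          have h2 : (c == '-') = false := by simp; tauto
          simp [stepB, h0, h1, h2]
        rw [hg, hstep, ih _ _ h]

theorem foldl_stepB_nil (cs : List Char) : ∀ (p : Bool),
    (cs.foldl stepB ([], p)).1 = Fmain (cs.filterMap gchar) := by
  induction cs with
  | nil => intro p; rfl
  | cons c t ih =>
    intro p
    simp only [List.foldl_cons, List.filterMap_cons]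
    by_cases ha : PySem.Chars.isalnum c = true
    · have hg : gchar c = some (PySem.Chars.lowerChar c) := by simp [gchar, ha]
      have hne : PySem.Chars.lowerChar c ≠ '-' := lower_ne_dash c ha
      have hstep : stepB ([], p) c = ([PySem.Chars.lowerChar c], false) := by
        simp [stepB, ha]
      rw [hg, hstep, foldl_stepB_ne_nil t _ false (by simp)]
      simp [Fmain, hne]
    · have h0 : PySem.Chars.isalnum c = false := by simpa using ha
      by_cases hs : c = ' ' ∨ c = '-'
      · have hg : gchar c = some '-' := by simp [gchar, h0, hs]
        have hstep : stepB ([], p) c = ([], true) := by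
          rcases hs with rfl | rfl <;> simp [stepB, h0]
        rw [hg, hstep, ih]
        simp [Fmain]
      · have hg : gchar c = none := by simp [gchar, h0, hs]
        have hstep : stepB ([], p) c = ([], p) := by
          have h1 : (c == ' ') = false := by simp; tauto
          have h2 : (c == '-') = false := by simp; tauto
          simp [stepB, h0, h1, h2]
        rw [hg, hstep, ih]

-- ---- A's pipeline on lists ----
theorem replace_go_space (fuel : Nat) : ∀ (l acc : List Char), l.length ≤ fuel →
    PySem.Chars.replace.go [' '] ['-'] fuel l acc
      = acc.reverse ++ l.map (fun c => if c = ' ' then '-' else c) := by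
  induction fuel with
  | zero =>
    intro l acc h
    have : l = [] := List.eq_nil_of_length_eq_zero (Nat.le_zero.mp h)
    subst this
    rw [PySem.Chars.replace.go.eq_def]
    simp
  | succ fuel ih =>
    intro l acc h
    match l with
    | [] => rw [PySem.Chars.replace.go.eq_def]; simp
    | c :: t =>
      rw [PySem.Chars.replace.go.eq_def]
      by_cases hp : List.isPrefixOf [' '] (c :: t) = true
      · rcases List.isPrefixOf_iff_prefix.mp hp with ⟨s, hs⟩
        simp at hs
        obtain ⟨rfl, rfl⟩ := hs
        simp only [hp, if_true]
        rw [show List.drop ([' '] : List Char).length (' ' :: s) = s from rfl]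
        rw [ih s (['-'].reverse ++ acc) (by simp at h; omega)]
        simp
      · have hc : c ≠ ' ' := by
          intro rfl
          simp [List.isPrefixOf] at hp
        simp only [hp, if_false]
        rw [ih t (c :: acc) (by simp at h; omega)]
        simp [hc]

theorem replace_space_eq (l : List Char) :
    PySem.Chars.replace l [' '] ['-'] = l.map (fun c => if c = ' ' then '-' else c) := by
  unfold PySem.Chars.replace
  simp only [List.isEmpty_cons, if_false, Bool.false_eq_true]
  exact (replace_go_space l.length l [] le_rfl).trans (by simp)

-- ===== VERDICT (by name: the statement is the Claim_ definition above) =====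
theorem create_anchor_py_spec : Claim_equal_create_anchor_py := by
  intro text _
  unfold Spec_create_anchor_py create_anchor_py create_anchor_py_alt
  dsimp only
  rw [loopA_eq_squeezeR, stripChars_eq]
  have h2 : (PySem.Str.replace (PySem.Str.lower text) " " "-").toList
      = (PySem.Chars.lower text.toList).map (fun c => if c = ' ' then '-' else c) := by
    simp [PySem.Str.replace, PySem.Str.lower]
    exact replace_space_eq _
  simp only [String.toList_ofList, h2]
  rw [filter_map_eq_filterMap, strip_squeezeR, foldl_stepB_nil]
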